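-- pv_equiv track=rewrite | github.com/batukoray/Korado | korado.py | _detect_obj
-- ===== SOURCE A (Python) =====
-- _OBJ_KW = {
--     'MAXIMIZE': 'MAX', 'MAXIMISE': 'MAX', 'MAX': 'MAX',
--     'MINIMIZE': 'MIN', 'MINIMISE': 'MIN', 'MIN': 'MIN',
-- }
--
-- def _detect_obj(line: str) -> tuple[str, str] | None:
--     """Return (sense, expression_text) if *line* begins with an objective keyword."""
--     upper = line.lstrip().upper()
--     # Try longest keywords first so MAXIMIZE beats MAX, etc.
--     for kw in sorted(_OBJ_KW, key=len, reverse=True):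
--         if upper.startswith(kw):
--             rest = line.lstrip()[len(kw):]
--             if rest and not rest[0].isspace():
--                 continue
--             return _OBJ_KW[kw], rest.strip()
--     return None
-- ===== SOURCE B (Python) =====
-- _OBJ_KW = {
--     'MAXIMIZE': 'MAX', 'MAXIMISE': 'MAX', 'MAX': 'MAX',
--     'MINIMIZE': 'MIN', 'MINIMISE': 'MIN', 'MIN': 'MIN',
-- }
--
-- def _detect_obj(line):
--     """Return (sense, expression_text) if *line* begins with an objective keyword."""
--     parts = line.split(None, 1)
--     if not parts:
--         return None
--     sense = _OBJ_KW.get(parts[0].upper())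
--     if sense is None:
--         return None
--     rest = parts[1] if len(parts) > 1 else ''
--     return sense, rest.strip()
-- ===== Notes on version B (the rewrite author's own statement) =====
-- stated objective: simpler
-- what changed: B splits off the first whitespace-delimited token with line.split(None, 1) and does one dict lookup on its uppercase form, replacing A's sorted longest-first keyword loop with startswith and a manual word-boundary check.
import Mathlib
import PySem

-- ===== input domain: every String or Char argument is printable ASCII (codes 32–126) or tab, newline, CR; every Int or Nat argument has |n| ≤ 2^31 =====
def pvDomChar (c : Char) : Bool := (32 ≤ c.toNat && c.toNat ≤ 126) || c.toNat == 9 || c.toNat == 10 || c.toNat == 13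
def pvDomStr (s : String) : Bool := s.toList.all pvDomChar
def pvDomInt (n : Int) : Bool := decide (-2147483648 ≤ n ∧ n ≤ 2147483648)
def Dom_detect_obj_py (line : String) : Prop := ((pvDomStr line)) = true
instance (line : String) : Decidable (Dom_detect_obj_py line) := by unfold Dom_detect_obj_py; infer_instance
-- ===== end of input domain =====

-- B replaces A's sorted longest-first keyword loop (startswith + manual word-boundary
-- check) by splitting off the first whitespace-delimited token and one dict lookup;
-- objective: simpler.

-- ===== PORT A =====
-- the module constant _OBJ_KW (shared by both Pythons)
def pvObjKw : PySem.Dict String String :=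
  PySem.Dict.ofList [("MAXIMIZE","MAX"),("MAXIMISE","MAX"),("MAX","MAX"),
                     ("MINIMIZE","MIN"),("MINIMISE","MIN"),("MIN","MIN")]

-- the 'for kw in sorted(...)' loop; stripped = line.lstrip(), upper = stripped.upper()
-- (both as char lists).  line.lstrip()[len(kw):] is a nonnegative-index slice = List.drop.
-- _OBJ_KW[kw] is ported as getD with a dummy default: kw is always a key of the dict.
def pvDetectLoop (stripped upper : List Char) : List String → Option (String × String)
  | [] => none
  | kw :: ks =>
    if PySem.Chars.startswith upper kw.toList then
      let rest := stripped.drop kw.toList.length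
      match rest with
      | [] => some (PySem.Dict.getD pvObjKw kw "", String.ofList (PySem.Chars.strip rest))
      | c :: _ =>
        if PySem.Chars.isspace c then
          some (PySem.Dict.getD pvObjKw kw "", String.ofList (PySem.Chars.strip rest))
        else pvDetectLoop stripped upper ks
    else pvDetectLoop stripped upper ks

def detect_obj_py (line : String) : Option (String × String) :=
  let stripped := PySem.Chars.lstrip line.toList
  let upper := PySem.Chars.upper stripped
  pvDetectLoop stripped upper
    (PySem.List.sorted (PySem.Dict.keys pvObjKw) (fun s => PySem.Str.len s) true)

-- ===== PORT B =====
def detect_obj_py_alt (line : String) : Option (String × String) :=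
  match PySem.Str.split₀Max line 1 with                -- parts = line.split(None, 1)
  | [] => none                                        -- if not parts: return None
  | tok :: restParts =>
    match PySem.Dict.get? pvObjKw (PySem.Str.upper tok) with   -- _OBJ_KW.get(...)
    | none => none
    | some sense =>
      some (sense, PySem.Str.strip (match restParts with | [] => "" | r :: _ => r))

-- ===== PRECONDITION & SPEC =====
def Spec_detect_obj_py (line : String) (out : Option (String × String)) : Prop := out = detect_obj_py_alt line
instance (line : String) (out : Option (String × String)) : Decidable (Spec_detect_obj_py line out) := by unfold Spec_detect_obj_py; infer_instance

-- ===== CLAIM (what is proved, stated in full; the proofs are below) =====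
def Claim_equal_detect_obj_py : Prop := ∀ (line : String), Dom_detect_obj_py line → Spec_detect_obj_py line (detect_obj_py line)

-- ===== LEMMAS AND PROOFS =====

-- abbreviations: for t = line.lstrip() (as chars), pvTok t is the first
-- whitespace-delimited token, pvRest t the remainder.
def pvTok (t : List Char) : List Char := t.takeWhile (fun c => !PySem.Chars.isspace c)
def pvRest (t : List Char) : List Char := t.dropWhile (fun c => !PySem.Chars.isspace c)

theorem pvTok_append_pvRest (t : List Char) : pvTok t ++ pvRest t = t :=
  List.takeWhile_append_dropWhile

-- a space char is not lowercase, so upperChar fixes it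
theorem pvUpperChar_of_isspace {c : Char} (h : PySem.Chars.isspace c = true) :
    PySem.Chars.upperChar c = c := by
  unfold PySem.Chars.upperChar PySem.Chars.islower
  have hn : ¬('a' ≤ c ∧ c ≤ 'z') := by
    unfold PySem.Chars.isspace at h
    simp only [Bool.or_eq_true, Bool.and_eq_true, decide_eq_true_eq] at h
    rintro ⟨h1, h2⟩
    simp only [Char.le_def] at h1 h2
    change (97 : Nat) ≤ c.toNat at h1
    change c.toNat ≤ (122 : Nat) at h2
    omega
  simp only [Bool.and_eq_true, decide_eq_true_eq]
  rw [if_neg hn]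

theorem pvHead_dropWhile {l : List Char} {c : Char} {ll : List Char} {p : Char → Bool}
    (h : List.dropWhile p l = c :: ll) : p c = false := by
  induction l with
  | nil => simp at h
  | cons a t ih =>
    rw [List.dropWhile_cons] at h
    by_cases hp : p a = true
    · rw [if_pos hp] at h; exact ih h
    · rw [if_neg hp] at h; cases h; simpa using hp

theorem pvTakeWhile_eq_take {p : Char → Bool} (t : List Char) (k : ℕ)
    (h1 : ∀ c ∈ t.take k, p c = true)
    (h2 : t.drop k = [] ∨ ∃ c l, t.drop k = c :: l ∧ p c = false) :
    t.takeWhile p = t.take k := by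
  induction t generalizing k with
  | nil => simp
  | cons a t ih =>
    cases k with
    | zero =>
      simp only [List.take_zero]
      rcases h2 with h2 | ⟨c, l, hcl, hpc⟩
      · simp at h2
      · simp only [List.drop_zero] at hcl
        cases hcl
        simp [hpc]
    | succ k =>
      have hpa : p a = true := h1 a (by simp)
      simp only [List.take_succ_cons, List.takeWhile_cons, hpa, if_true]
      rw [ih k (fun c hc => h1 c (by simp [hc])) (by simpa using h2)]

-- if the token uppercased to kw, A's rest slice t.drop |kw| is exactly pvRest t
theorem pvDrop_len (t : List Char) (kw : List Char)
    (h : (pvTok t).map PySem.Chars.upperChar = kw) :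
    t.drop kw.length = pvRest t := by
  have hl : (pvTok t).length = kw.length := by rw [← h]; simp
  conv_lhs => rw [← pvTok_append_pvRest t]
  rw [← hl, List.drop_left]

-- the heart of the equivalence: A's "startswith + word boundary" condition for a
-- space-free keyword holds iff the first token of t uppercases exactly to that keyword
theorem pvMatch_iff (t kw : List Char)
    (hns : ∀ c ∈ kw, PySem.Chars.isspace c = false) :
    (kw <+: t.map PySem.Chars.upperChar ∧
      (t.drop kw.length = [] ∨
        ∃ c l, t.drop kw.length = c :: l ∧ PySem.Chars.isspace c = true)) ↔
    (pvTok t).map PySem.Chars.upperChar = kw := by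
  constructor
  · rintro ⟨hpre, hbd⟩
    have hk : (t.take kw.length).map PySem.Chars.upperChar = kw := by
      have h1 := List.prefix_iff_eq_take.mp hpre
      rw [← List.map_take] at h1
      exact h1.symm
    have hsp : ∀ c ∈ t.take kw.length, (!PySem.Chars.isspace c) = true := by
      intro c hc
      have hu : PySem.Chars.upperChar c ∈ kw := by
        rw [← hk]; exact List.mem_map_of_mem hc
      have hku := hns _ hu
      by_contra hcc
      have hcs : PySem.Chars.isspace c = true := by simpa using hcc
      rw [pvUpperChar_of_isspace hcs, hcs] at hku
      simp at hku
    have htw : pvTok t = t.take kw.length := by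
      apply pvTakeWhile_eq_take t kw.length hsp
      rcases hbd with h | ⟨c, l, hcl, hcs⟩
      · exact Or.inl h
      · exact Or.inr ⟨c, l, hcl, by simp [hcs]⟩
    rw [pvTok] at htw ⊢
    rw [htw, hk]
  · intro h
    have hsub : pvTok t <+: t := List.takeWhile_prefix _
    refine ⟨?_, ?_⟩
    · rw [← h]; exact hsub.map _
    · rw [pvDrop_len t kw h]
      cases hr : pvRest t with
      | nil => exact Or.inl rfl
      | cons c l =>
        refine Or.inr ⟨c, l, rfl, ?_⟩
        have := pvHead_dropWhile (p := fun c => !PySem.Chars.isspace c) hr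
        simpa using this

def pvGood (kw : String) : Prop :=
  ∀ c ∈ kw.toList, PySem.Chars.isspace c = false

-- one step of A's loop, rephrased through pvMatch_iff
theorem pvLoop_step (t : List Char) (kw : String) (ks : List String) (hg : pvGood kw) :
    pvDetectLoop t (PySem.Chars.upper t) (kw :: ks) =
      if (pvTok t).map PySem.Chars.upperChar = kw.toList then
        some (PySem.Dict.getD pvObjKw kw "",
              String.ofList (PySem.Chars.strip (t.drop kw.toList.length)))
      else pvDetectLoop t (PySem.Chars.upper t) ks := by
  have hupper : PySem.Chars.upper t = t.map PySem.Chars.upperChar := rfl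
  by_cases hm : (pvTok t).map PySem.Chars.upperChar = kw.toList
  · obtain ⟨hpre, hbd⟩ := (pvMatch_iff t kw.toList hg).mpr hm
    have hsw : PySem.Chars.startswith (PySem.Chars.upper t) kw.toList = true := by
      rw [hupper, PySem.Chars.startswith, List.isPrefixOf_iff_prefix]
      exact hpre
    rw [if_pos hm]
    rcases hbd with hnil | ⟨c, l, hcl, hsp⟩
    · simp only [pvDetectLoop, hsw, if_true]
      rw [hnil]
    · simp only [pvDetectLoop, hsw, if_true]
      rw [hcl]
      simp [hsp]
  · rw [if_neg hm]
    by_cases hsw : PySem.Chars.startswith (PySem.Chars.upper t) kw.toList = true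
    · have hpre : kw.toList <+: t.map PySem.Chars.upperChar := by
        rw [hupper, PySem.Chars.startswith, List.isPrefixOf_iff_prefix] at hsw
        exact hsw
      cases hd : t.drop kw.toList.length with
      | nil =>
        exact absurd ((pvMatch_iff t kw.toList hg).mp ⟨hpre, Or.inl hd⟩) hm
      | cons c l =>
        by_cases hspc : PySem.Chars.isspace c = true
        · exact absurd ((pvMatch_iff t kw.toList hg).mp
            ⟨hpre, Or.inr ⟨c, l, hd, hspc⟩⟩) hm
        · simp only [pvDetectLoop, hsw, if_true]
          rw [hd]
          simp [hspc]
    · simp only [pvDetectLoop]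
      rw [if_neg (by simpa using hsw)]

theorem pvOfList_eq_iff (l : List Char) (s : String) : String.ofList l = s ↔ l = s.toList := by
  constructor
  · intro h; rw [← h]; simp
  · intro h; rw [h]; simp

-- one unfolding of the split(None, maxsplit) worker
theorem pvGoSucc (fuel m : ℕ) (l : List Char) (acc : List (List Char)) :
    PySem.Chars.split₀Max.go (fuel+1) m l acc =
      match List.dropWhile PySem.Chars.isspace l with
      | [] => acc.reverse
      | l' => if m = 0 then (l' :: acc).reverse
        else PySem.Chars.split₀Max.go fuel (m-1)
          (List.dropWhile (fun c => !PySem.Chars.isspace c) l')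
          (List.takeWhile (fun c => !PySem.Chars.isspace c) l' :: acc) := rfl

-- line.split(None, 1), characterised
theorem pvSplit1 (cs : List Char) :
    PySem.Chars.split₀Max cs 1 =
      (match PySem.Chars.lstrip cs with
       | [] => []
       | t =>
         pvTok t ::
           (match PySem.Chars.lstrip (pvRest t) with
            | [] => []
            | r => [r])) := by
  cases cs with
  | nil => rfl
  | cons b bs =>
    unfold PySem.Chars.split₀Max
    rw [if_neg (by norm_num)]
    have hlen : (b :: bs).length + 1 = (bs.length + 1) + 1 := by simp
    rw [hlen, pvGoSucc]
    simp only [PySem.Chars.lstrip]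
    cases ht : List.dropWhile PySem.Chars.isspace (b :: bs) with
    | nil => rfl
    | cons a t' =>
      simp only [pvTok, pvRest]
      rw [pvGoSucc]
      cases hr : List.dropWhile PySem.Chars.isspace
          (List.dropWhile (fun c => !PySem.Chars.isspace c) (a :: t')) with
      | nil => rfl
      | cons x xs => rfl

theorem pvStrip_lstrip (l : List Char) :
    PySem.Chars.strip (PySem.Chars.lstrip l) = PySem.Chars.strip l := by
  simp [PySem.Chars.strip, PySem.Chars.lstrip, List.dropWhile_idempotent]

set_option maxRecDepth 10000 in
theorem pvKws : PySem.List.sorted (PySem.Dict.keys pvObjKw) (fun s => PySem.Str.len s) true =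
    ["MAXIMIZE","MAXIMISE","MINIMIZE","MINIMISE","MAX","MIN"] := by decide

theorem pvGood_of (kw : String) (c0 : Char) (l : List Char) (hl : kw.toList = c0 :: l)
    (hs : ∀ c ∈ c0 :: l, PySem.Chars.isspace c = false) : pvGood kw :=
  fun c hc => hs c (hl ▸ hc)

theorem pvGet?_none (u : List Char)
    (h1 : u ≠ "MAXIMIZE".toList) (h2 : u ≠ "MAXIMISE".toList) (h3 : u ≠ "MAX".toList)
    (h4 : u ≠ "MINIMIZE".toList) (h5 : u ≠ "MINIMISE".toList) (h6 : u ≠ "MIN".toList) :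
    PySem.Dict.get? pvObjKw (String.ofList u) = none := by
  have e1 : String.ofList u ≠ "MAXIMIZE" := fun h => h1 ((pvOfList_eq_iff u _).mp h)
  have e2 : String.ofList u ≠ "MAXIMISE" := fun h => h2 ((pvOfList_eq_iff u _).mp h)
  have e3 : String.ofList u ≠ "MAX" := fun h => h3 ((pvOfList_eq_iff u _).mp h)
  have e4 : String.ofList u ≠ "MINIMIZE" := fun h => h4 ((pvOfList_eq_iff u _).mp h)
  have e5 : String.ofList u ≠ "MINIMISE" := fun h => h5 ((pvOfList_eq_iff u _).mp h)
  have e6 : String.ofList u ≠ "MIN" := fun h => h6 ((pvOfList_eq_iff u _).mp h)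
  have hit : pvObjKw.items = [("MAXIMIZE","MAX"),("MAXIMISE","MAX"),("MAX","MAX"),
      ("MINIMIZE","MIN"),("MINIMISE","MIN"),("MIN","MIN")] := by decide
  have b1 : ("MAXIMIZE" == String.ofList u) = false := beq_eq_false_iff_ne.mpr (Ne.symm e1)
  have b2 : ("MAXIMISE" == String.ofList u) = false := beq_eq_false_iff_ne.mpr (Ne.symm e2)
  have b3 : ("MAX" == String.ofList u) = false := beq_eq_false_iff_ne.mpr (Ne.symm e3)
  have b4 : ("MINIMIZE" == String.ofList u) = false := beq_eq_false_iff_ne.mpr (Ne.symm e4)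
  have b5 : ("MINIMISE" == String.ofList u) = false := beq_eq_false_iff_ne.mpr (Ne.symm e5)
  have b6 : ("MIN" == String.ofList u) = false := beq_eq_false_iff_ne.mpr (Ne.symm e6)
  simp [PySem.Dict.get?, hit, List.find?, b1, b2, b3, b4, b5, b6]

-- ===== VERDICT (by name: the statement is the Claim_ definition above) =====
set_option maxRecDepth 10000 in
theorem detect_obj_py_spec : Claim_equal_detect_obj_py := by
  intro line _
  show detect_obj_py line = detect_obj_py_alt line
  unfold detect_obj_py detect_obj_py_alt
  rw [pvKws]
  simp only [PySem.Str.split₀Max]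
  rw [pvSplit1 line.toList]
  cases ht : PySem.Chars.lstrip line.toList with
  | nil => decide
  | cons a t0 =>
    simp only [List.map_cons]
    rw [pvLoop_step _ _ _ (pvGood_of "MAXIMIZE" 'M' ['A','X','I','M','I','Z','E'] rfl (by intro c hc; fin_cases hc <;> rfl)),
        pvLoop_step _ _ _ (pvGood_of "MAXIMISE" 'M' ['A','X','I','M','I','S','E'] rfl (by intro c hc; fin_cases hc <;> rfl)),
        pvLoop_step _ _ _ (pvGood_of "MINIMIZE" 'M' ['I','N','I','M','I','Z','E'] rfl (by intro c hc; fin_cases hc <;> rfl)),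
        pvLoop_step _ _ _ (pvGood_of "MINIMISE" 'M' ['I','N','I','M','I','S','E'] rfl (by intro c hc; fin_cases hc <;> rfl)),
        pvLoop_step _ _ _ (pvGood_of "MAX" 'M' ['A','X'] rfl (by intro c hc; fin_cases hc <;> rfl)),
        pvLoop_step _ _ _ (pvGood_of "MIN" 'M' ['I','N'] rfl (by intro c hc; fin_cases hc <;> rfl))]
    have hu : PySem.Str.upper (String.ofList (pvTok (a :: t0))) =
        String.ofList ((pvTok (a :: t0)).map PySem.Chars.upperChar) := by
      simp [PySem.Str.upper, PySem.Chars.upper]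
    by_cases e1 : (pvTok (a :: t0)).map PySem.Chars.upperChar = "MAXIMIZE".toList
    · rw [if_pos e1, pvDrop_len _ _ e1, hu, e1, String.ofList_toList,
          show pvObjKw.get? "MAXIMIZE" = some "MAX" from by decide,
          show pvObjKw.getD "MAXIMIZE" "" = "MAX" from by decide]
      cases hr : PySem.Chars.lstrip (pvRest (a :: t0)) with
      | nil =>
        rw [← pvStrip_lstrip, hr]
        simp [PySem.Str.strip]
      | cons x xs =>
        rw [← pvStrip_lstrip, hr]
        simp [PySem.Str.strip]
    rw [if_neg e1]
    by_cases e2 : (pvTok (a :: t0)).map PySem.Chars.upperChar = "MAXIMISE".toList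
    · rw [if_pos e2, pvDrop_len _ _ e2, hu, e2, String.ofList_toList,
          show pvObjKw.get? "MAXIMISE" = some "MAX" from by decide,
          show pvObjKw.getD "MAXIMISE" "" = "MAX" from by decide]
      cases hr : PySem.Chars.lstrip (pvRest (a :: t0)) with
      | nil =>
        rw [← pvStrip_lstrip, hr]
        simp [PySem.Str.strip]
      | cons x xs =>
        rw [← pvStrip_lstrip, hr]
        simp [PySem.Str.strip]
    rw [if_neg e2]
    by_cases e3 : (pvTok (a :: t0)).map PySem.Chars.upperChar = "MINIMIZE".toList
    · rw [if_pos e3, pvDrop_len _ _ e3, hu, e3, String.ofList_toList,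
          show pvObjKw.get? "MINIMIZE" = some "MIN" from by decide,
          show pvObjKw.getD "MINIMIZE" "" = "MIN" from by decide]
      cases hr : PySem.Chars.lstrip (pvRest (a :: t0)) with
      | nil =>
        rw [← pvStrip_lstrip, hr]
        simp [PySem.Str.strip]
      | cons x xs =>
        rw [← pvStrip_lstrip, hr]
        simp [PySem.Str.strip]
    rw [if_neg e3]
    by_cases e4 : (pvTok (a :: t0)).map PySem.Chars.upperChar = "MINIMISE".toList
    · rw [if_pos e4, pvDrop_len _ _ e4, hu, e4, String.ofList_toList,
          show pvObjKw.get? "MINIMISE" = some "MIN" from by decide,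
          show pvObjKw.getD "MINIMISE" "" = "MIN" from by decide]
      cases hr : PySem.Chars.lstrip (pvRest (a :: t0)) with
      | nil =>
        rw [← pvStrip_lstrip, hr]
        simp [PySem.Str.strip]
      | cons x xs =>
        rw [← pvStrip_lstrip, hr]
        simp [PySem.Str.strip]
    rw [if_neg e4]
    by_cases e5 : (pvTok (a :: t0)).map PySem.Chars.upperChar = "MAX".toList
    · rw [if_pos e5, pvDrop_len _ _ e5, hu, e5, String.ofList_toList,
          show pvObjKw.get? "MAX" = some "MAX" from by decide,
          show pvObjKw.getD "MAX" "" = "MAX" from by decide]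
      cases hr : PySem.Chars.lstrip (pvRest (a :: t0)) with
      | nil =>
        rw [← pvStrip_lstrip, hr]
        simp [PySem.Str.strip]
      | cons x xs =>
        rw [← pvStrip_lstrip, hr]
        simp [PySem.Str.strip]
    rw [if_neg e5]
    by_cases e6 : (pvTok (a :: t0)).map PySem.Chars.upperChar = "MIN".toList
    · rw [if_pos e6, pvDrop_len _ _ e6, hu, e6, String.ofList_toList,
          show pvObjKw.get? "MIN" = some "MIN" from by decide,
          show pvObjKw.getD "MIN" "" = "MIN" from by decide]
      cases hr : PySem.Chars.lstrip (pvRest (a :: t0)) with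
      | nil =>
        rw [← pvStrip_lstrip, hr]
        simp [PySem.Str.strip]
      | cons x xs =>
        rw [← pvStrip_lstrip, hr]
        simp [PySem.Str.strip]
    rw [if_neg e6]
    rw [hu, pvGet?_none _ e1 e2 e5 e3 e4 e6]
    simp [pvDetectLoop]
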